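-- pv_equiv track=rewrite | github.com/kent010341/python_playground | PSO_TSP/main_code.py | lehmer_decode
-- ===== SOURCE A (Python) =====
-- city_count = 50
--
-- def lehmer_decode(lehmer_code):
-- 	temp_seq = list(range(city_count))
-- 	opt = list()
-- 	for code in lehmer_code:
-- 		temp = temp_seq[int(code)]
-- 		opt.append(temp)
-- 		temp_seq.remove(temp)
--
-- 	return opt
-- ===== SOURCE B (Python) =====
-- city_count = 50
--
-- def lehmer_decode(lehmer_code):
-- 	# keep a set of already-chosen cities; each step rebuilds the list of
-- 	# cities still available and indexes into it
-- 	taken = set()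
-- 	opt = []
-- 	for code in lehmer_code:
-- 		remaining = [c for c in range(city_count) if c not in taken]
-- 		city = remaining[int(code)]
-- 		opt.append(city)
-- 		taken.add(city)
-- 	return opt
-- ===== Notes on version B (the rewrite author's own statement) =====
-- stated objective: alternative
-- what changed: Replaces A's mutable shrinking list (index, append, remove-by-value) by an immutable formulation: a 'taken' set is the only state, and each step rebuilds the list of still-available cities by filtering range(city_count) against the set, indexes into it, and adds the chosen city to the set; Pre_ excludes exactly the inputs on which both programs raise IndexError (a code out of range of the remaining list).
import Mathlib
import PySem

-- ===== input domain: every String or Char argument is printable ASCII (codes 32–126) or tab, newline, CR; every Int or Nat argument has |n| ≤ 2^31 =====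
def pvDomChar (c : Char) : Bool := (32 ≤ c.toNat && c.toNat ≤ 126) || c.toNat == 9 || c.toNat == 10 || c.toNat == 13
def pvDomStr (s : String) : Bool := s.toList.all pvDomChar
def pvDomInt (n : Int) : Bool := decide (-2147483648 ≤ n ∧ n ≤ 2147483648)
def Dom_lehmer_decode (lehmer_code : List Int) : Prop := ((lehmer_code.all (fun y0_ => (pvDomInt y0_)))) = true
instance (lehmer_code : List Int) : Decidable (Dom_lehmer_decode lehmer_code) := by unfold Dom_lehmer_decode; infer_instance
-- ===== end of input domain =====

-- B replaces A's mutable shrinking list (index/append/remove) by an immutable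
-- formulation whose only state is a 'taken' set: the list of still-available
-- cities is rebuilt by filtering each step (objective: alternative).

-- ===== PORT A =====
-- loop body of A: temp = temp_seq[int(code)]; opt.append(temp); temp_seq.remove(temp)
def lehmerGoA (temp_seq : List Int) (codes : List Int) : List Int :=
  match codes with
  | [] => []
  | c :: rest =>
    match PySem.List.pyGet? temp_seq c with
    | none => []                   -- IndexError in Python (excluded by Pre_)
    | some t =>
      match PySem.List.remove? temp_seq t with
      | none => []                 -- unreachable: t ∈ temp_seq
      | some ts => t :: lehmerGoA ts rest

def lehmer_decode (lehmer_code : List Int) : List Int :=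
  lehmerGoA (PySem.List.pyRange 0 50 1) lehmer_code

-- ===== PORT B =====
-- remaining = [c for c in range(city_count) if c not in taken]
def remB (taken : PySem.Set Int) : List Int :=
  (PySem.List.pyRange 0 50 1).filter (fun c => !(PySem.Set.contains taken c))

-- loop of B: city = remaining[int(code)]; opt.append(city); taken.add(city)
def lehmerGoB (taken : PySem.Set Int) (codes : List Int) : List Int :=
  match codes with
  | [] => []
  | c :: rest =>
    match PySem.List.pyGet? (remB taken) c with
    | none => []                   -- IndexError in Python (excluded by Pre_)
    | some city => city :: lehmerGoB (PySem.Set.add taken city) rest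

def lehmer_decode_alt (lehmer_code : List Int) : List Int :=
  lehmerGoB PySem.Set.empty lehmer_code

-- ===== PRECONDITION & SPEC =====
-- Pre_ excludes exactly the inputs on which the Python A (and B) raises
-- IndexError: at step i the remaining list has 50 - i elements, so the i-th
-- code must lie in [-(50-i), 50-i).
def Pre_lehmer_decode (lehmer_code : List Int) : Prop :=
  ∀ i : Fin lehmer_code.length,
    -((50 : Int) - i.1) ≤ lehmer_code.get i ∧ lehmer_code.get i < 50 - i.1
instance (lehmer_code : List Int) : Decidable (Pre_lehmer_decode lehmer_code) := by
  unfold Pre_lehmer_decode; infer_instance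

def pvWitness_lehmer_decode : List Int := [0, 0, -1, 40]

def Spec_lehmer_decode (lehmer_code : List Int) (out : List Int) : Prop := out = lehmer_decode_alt lehmer_code
instance (lehmer_code : List Int) (out : List Int) : Decidable (Spec_lehmer_decode lehmer_code out) := by unfold Spec_lehmer_decode; infer_instance

-- ===== CLAIM (what is proved, stated in full; the proofs are below) =====
def Claim_equal_lehmer_decode : Prop := ∀ (lehmer_code : List Int), Dom_lehmer_decode lehmer_code → Pre_lehmer_decode lehmer_code → Spec_lehmer_decode lehmer_code (lehmer_decode lehmer_code)

-- ===== LEMMAS AND PROOFS =====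

theorem contains_add_eq (taken : PySem.Set Int) (t c : Int) :
    PySem.Set.contains (PySem.Set.add taken t) c
      = (PySem.Set.contains taken c || c == t) := by
  rw [Bool.eq_iff_iff]
  simp [PySem.Set.mem_add]

theorem nodup_remB (taken : PySem.Set Int) : (remB taken).Nodup :=
  (PySem.List.nodup_pyRange_one 0 50).filter _

theorem remB_add (taken : PySem.Set Int) (t : Int) :
    remB (PySem.Set.add taken t) = (remB taken).erase t := by
  rw [(nodup_remB taken).erase_eq_filter]
  unfold remB
  rw [List.filter_filter]
  apply List.filter_congr
  intro c _
  rw [contains_add_eq]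
  cases h : PySem.Set.contains taken c <;> cases h2 : c == t <;>
    simp_all [beq_iff_eq]

theorem mem_of_pyGet? {xs : List Int} {i t : Int}
    (h : PySem.List.pyGet? xs i = some t) : t ∈ xs := by
  by_cases hi : 0 ≤ i
  · rw [PySem.List.pyGet?_of_nonneg xs hi] at h
    exact List.mem_of_getElem? h
  · have hk1 : 0 < (-i).toNat := by omega
    have hie : i = -(((-i).toNat : Nat) : Int) := by omega
    by_cases hk2 : (-i).toNat ≤ xs.length
    · rw [hie, PySem.List.pyGet?_neg_natCast xs (-i).toNat hk1 hk2] at h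
      exact List.mem_of_getElem? h
    · rw [PySem.List.pyGet?_eq_none_iff (xs := xs) (i := i) |>.mpr (by
        simp [PySem.Raise.InRange]; omega)] at h
      exact absurd h (by simp)

theorem goAB (codes : List Int) (taken : PySem.Set Int) :
    lehmerGoA (remB taken) codes = lehmerGoB taken codes := by
  induction codes generalizing taken with
  | nil => rfl
  | cons c rest ih =>
    simp only [lehmerGoA, lehmerGoB]
    cases hget : PySem.List.pyGet? (remB taken) c with
    | none => rfl
    | some t =>
      have hmem : t ∈ remB taken := mem_of_pyGet? hget
      simp only [PySem.List.remove?_eq_some_erase _ t hmem, ← remB_add taken t, ih]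

theorem initial_remB : PySem.List.pyRange 0 50 1 = remB PySem.Set.empty := by
  decide

theorem lehmer_total (lehmer_code : List Int) :
    lehmer_decode lehmer_code = lehmer_decode_alt lehmer_code := by
  unfold lehmer_decode lehmer_decode_alt
  rw [initial_remB]
  exact goAB lehmer_code PySem.Set.empty

-- ===== VERDICT (by name: the statement is the Claim_ definition above) =====
theorem lehmer_decode_spec : Claim_equal_lehmer_decode := by
  intro l _ _
  unfold Spec_lehmer_decode
  exact lehmer_total l
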